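-- pv_equiv track=rewrite | github.com/redachourouki/FilZin | main.py | create_nail_labels
-- ===== SOURCE A (Python) =====
-- def create_nail_labels(nail_count=200):
--     """Create sectioned nail labels: A1-A50, B1-B50, C1-C50, D1-D50"""
--     labels = []
--     sections = ['A', 'B', 'C', 'D']
--     nails_per_section = nail_count // 4  # 50 nails per section
--
--     for section_idx, section in enumerate(sections):
--         for nail_num in range(1, nails_per_section + 1):
--             labels.append(f"{section}{nail_num}")
--
--     return labels
-- ===== SOURCE B (Python) =====
-- def create_nail_labels(nail_count=200):
--     """Create sectioned nail labels: A1-A50, B1-B50, C1-C50, D1-D50"""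
--     sections = ['A', 'B', 'C', 'D']
--     n = nail_count // 4
--     if n <= 0:
--         return []
--     return [sections[i // n] + str(i % n + 1) for i in range(4 * n)]
-- ===== Notes on version B (the rewrite author's own statement) =====
-- stated objective: alternative
-- what changed: Replaces the nested section/number loops with a single flat comprehension over range(4*n) that recovers section and number by divmod indexing.
import Mathlib
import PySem

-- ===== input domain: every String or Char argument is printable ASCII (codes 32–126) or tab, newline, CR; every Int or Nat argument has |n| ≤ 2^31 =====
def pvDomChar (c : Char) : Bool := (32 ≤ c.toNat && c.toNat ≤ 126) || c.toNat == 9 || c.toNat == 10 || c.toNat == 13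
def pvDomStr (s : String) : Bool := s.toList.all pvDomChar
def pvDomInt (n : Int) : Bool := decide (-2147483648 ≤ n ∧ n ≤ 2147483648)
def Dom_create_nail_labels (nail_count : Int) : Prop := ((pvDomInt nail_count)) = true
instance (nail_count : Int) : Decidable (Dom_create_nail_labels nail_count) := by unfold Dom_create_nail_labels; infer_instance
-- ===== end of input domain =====

-- B flattens A's nested section/number loops into one divmod-indexed pass; objective: alternative decomposition, same cost.

-- ===== PORT A =====
def create_nail_labels (nail_count : Int) : List String :=
  let sections : List String := ["A", "B", "C", "D"]
  let nails_per_section := PySem.Int.floordiv nail_count 4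
  (PySem.List.enumerate sections).foldl (fun labels p =>
    (PySem.List.pyRange 1 (nails_per_section + 1) 1).foldl
      (fun labels nail_num => labels ++ [p.2 ++ PySem.Int.toStr nail_num]) labels) []

-- ===== PORT B =====
-- sections[i // n] is always in range (0 ≤ i // n < 4), so the .getD "" default is never used
def create_nail_labels_alt (nail_count : Int) : List String :=
  let sections : List String := ["A", "B", "C", "D"]
  let n := PySem.Int.floordiv nail_count 4
  if n ≤ 0 then []
  else (PySem.List.pyRange 0 (4 * n) 1).map (fun i =>
    (PySem.List.pyGet? sections (PySem.Int.floordiv i n)).getD "" ++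
      PySem.Int.toStr (PySem.Int.mod i n + 1))

-- ===== PRECONDITION & SPEC =====
def Spec_create_nail_labels (nail_count : Int) (out : List String) : Prop := out = create_nail_labels_alt nail_count
instance (nail_count : Int) (out : List String) : Decidable (Spec_create_nail_labels nail_count out) := by unfold Spec_create_nail_labels; infer_instance

-- ===== CLAIM (what is proved, stated in full; the proofs are below) =====
def Claim_equal_create_nail_labels : Prop := ∀ (nail_count : Int), Dom_create_nail_labels nail_count → Spec_create_nail_labels nail_count (create_nail_labels nail_count)

-- ===== LEMMAS AND PROOFS =====

-- one chunk of B's flat range equals one of A's inner loops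
theorem pv_chunk (n j : Int) (hn : 0 < n) (s : String)
    (hs : (PySem.List.pyGet? ["A", "B", "C", "D"] j).getD "" = s) :
    (PySem.List.pyRange (j * n) ((j + 1) * n) 1).map
        (fun i => (PySem.List.pyGet? ["A", "B", "C", "D"] (PySem.Int.floordiv i n)).getD "" ++
          PySem.Int.toStr (PySem.Int.mod i n + 1))
      = (PySem.List.pyRange 1 (n + 1) 1).map (fun k => s ++ PySem.Int.toStr k) := by
  rw [PySem.List.pyRange_one (j * n) ((j + 1) * n), PySem.List.pyRange_one 1 (n + 1)]
  have h1 : ((j + 1) * n - j * n) = n := by ring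
  have h2 : (n + 1 - 1 : Int) = n := by ring
  rw [h1, h2, List.map_map, List.map_map]
  apply List.map_congr_left
  intro k hk
  have hk' : (k : Int) < n := by
    have := List.mem_range.mp hk
    omega
  have hk0 : (0 : Int) ≤ (k : Int) := Int.natCast_nonneg k
  have hfd : PySem.Int.floordiv (j * n + (k : Int)) n = j := by
    rw [PySem.Int.floordiv_eq_iff_of_pos hn]
    constructor
    · linarith
    · nlinarith
  have hmod : PySem.Int.mod (j * n + (k : Int)) n = (k : Int) := by
    have h := PySem.Int.floordiv_mul_add_mod (j * n + (k : Int)) n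
    rw [hfd] at h
    linarith
  simp only [Function.comp_apply]
  rw [hfd, hmod, hs, add_comm (1 : Int) (k : Int)]

-- ===== VERDICT (by name: the statement is the Claim_ definition above) =====
theorem create_nail_labels_spec : Claim_equal_create_nail_labels := by
  intro nc _
  unfold Spec_create_nail_labels create_nail_labels create_nail_labels_alt
  simp only [PySem.List.enumerate_cons, PySem.List.enumerate_nil, List.foldl_cons, List.foldl_nil,
    PySem.List.foldl_append_singleton_eq_map]
  set n := PySem.Int.floordiv nc 4 with hn
  by_cases h : n ≤ 0
  · rw [if_pos h, PySem.List.pyRange_one_eq_nil (by omega)]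
    simp
  · rw [if_neg h]
    replace h : 0 < n := by omega
    rw [PySem.List.pyRange_one_append 0 n (4 * n) (by linarith) (by linarith),
        PySem.List.pyRange_one_append n (2 * n) (4 * n) (by linarith) (by linarith),
        PySem.List.pyRange_one_append (2 * n) (3 * n) (4 * n) (by linarith) (by linarith)]
    simp only [List.map_append]
    have c0 := pv_chunk n 0 h "A" rfl
    have c1 := pv_chunk n 1 h "B" rfl
    have c2 := pv_chunk n 2 h "C" rfl
    have c3 := pv_chunk n 3 h "D" rfl
    norm_num at c0 c1 c2 c3
    rw [c0, c1, c2, c3]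
    simp [List.append_assoc]
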